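-- pv_equiv track=rewrite | github.com/itaygil135/Introduction-to-Computer-Science | z-extra/ex8_targil/lab_8.py | permutations_dist_helper
-- ===== SOURCE A (Python) =====
-- def permutations_dist_helper(word,dist,all_options,mila):
--     if len(word)==0:
--         all_options.append(mila)
--         return
--
--     for ind, item in enumerate(word):
--         if ok_to_place(mila,item, dist):
--             mila = mila + item
--             new_word = word[0:ind]+word[ind+1:]
--             permutations_dist_helper(new_word,dist,all_options,mila)
--             mila = mila[:-1]
--     return all_options
--
-- def ok_to_place(mila,item,dist):
--     if len(mila) == 0:
--         return True
--
--     num = ord(item) - ord(mila[-1])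
--     if num == 0:
--         return True
--
--     if num > 0 :
--         if num <= dist:
--             return True
--         else:
--             return False
--
--     num = -1 * num
--     if num <= dist:
--         return True
--     else:
--         return  False
-- ===== SOURCE B (Python) =====
-- def permutations_dist_helper(word, dist, all_options, mila):
--     # Level-synchronous breadth-first search: instead of recursive backtracking,
--     # keep the list of all valid partial states (built prefix, remaining letters)
--     # and advance all of them one level at a time; after len(word) levels every
--     # state is a complete word.  Level order equals the DFS output order because
--     # all results sit at the same depth.
--     if len(word) == 0:
--         all_options.append(mila)
--         return
--     states = [(mila, word)]
--     for _ in range(len(word)):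
--         states = [(m + w[i], w[:i] + w[i + 1:])
--                   for (m, w) in states
--                   for i in range(len(w))
--                   if not m or m[-1] == w[i] or abs(ord(m[-1]) - ord(w[i])) <= dist]
--     all_options.extend(m for (m, _) in states)
--     return all_options
-- ===== Notes on version B (the rewrite author's own statement) =====
-- stated objective: alternative
-- what changed: Replaces A's recursive backtracking DFS (which threads mila/all_options through recursive calls and backtracks mila) by an iterative level-synchronous breadth-first search: a list of partial states (prefix, remaining letters) advanced one level per iteration of a single loop, with the results collected from the final level.
-- outside the precondition, e.g. on permutations_dist_helper('', 3, [], 'ab'): A returns None, B returns None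
import Mathlib
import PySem

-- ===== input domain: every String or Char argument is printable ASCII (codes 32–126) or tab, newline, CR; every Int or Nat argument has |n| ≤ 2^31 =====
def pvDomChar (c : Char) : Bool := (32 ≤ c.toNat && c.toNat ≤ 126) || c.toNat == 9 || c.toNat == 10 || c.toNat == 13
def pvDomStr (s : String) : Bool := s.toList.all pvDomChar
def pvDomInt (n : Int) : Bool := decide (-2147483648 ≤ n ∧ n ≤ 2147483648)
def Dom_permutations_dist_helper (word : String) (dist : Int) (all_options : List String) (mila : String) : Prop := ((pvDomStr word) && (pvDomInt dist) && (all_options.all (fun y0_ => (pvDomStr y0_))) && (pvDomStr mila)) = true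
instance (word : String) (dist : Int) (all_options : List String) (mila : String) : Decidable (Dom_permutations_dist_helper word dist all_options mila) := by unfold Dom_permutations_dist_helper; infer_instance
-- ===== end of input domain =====

-- B replaces A's recursive backtracking DFS by an iterative level-synchronous BFS over partial
-- states (equal return values; both Pythons also append the results to all_options in place —
-- the equivalence proved here is about the return value; Pre_ excludes word = "" where both
-- Pythons return None instead of a list).


-- ===== PORT A =====
-- ok_to_place(mila, item, dist); the len(mila)==0 test is ported as the getLast? match
def ok_to_place (mila : List Char) (item : Char) (dist : Int) : Bool :=
  match mila.getLast? with
  | none => true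
  | some c =>
    let num : Int := (item.toNat : Int) - (c.toNat : Int)
    if num == 0 then true
    else if num > 0 then (if num ≤ dist then true else false)
    else (if (-1) * num ≤ dist then true else false)

-- A's recursive helper; the `for ind, item in enumerate(word)` loop is pdhALoop over the split
-- word = pre ++ item :: rest' (pre = word[0:ind], rest' = word[ind+1:]); all_options and mila
-- are threaded as state (Python mutates them in place and backtracks mila).
mutual
def pdhA (word : List Char) (dist : Int) (all_options : List String) (mila : List Char) : List String :=
  if word = [] then all_options ++ [String.mk mila]
  else pdhALoop word dist mila [] word all_options rfl
termination_by (word.length, word.length + 1)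

def pdhALoop (word : List Char) (dist : Int) (mila : List Char)
    (pre rest : List Char) (acc : List String) (h : pre ++ rest = word) : List String :=
  match rest with
  | [] => acc
  | item :: rest' =>
    pdhALoop word dist mila (pre ++ [item]) rest'
      (if ok_to_place mila item dist
        then pdhA (pre ++ rest') dist acc (mila ++ [item])
        else acc)
      (by rw [← h]; simp)
termination_by (word.length, rest.length)
decreasing_by
  · have : word.length = pre.length + (rest'.length + 1) := by
      rw [← h]; simp
    apply Prod.Lex.left; simp; omega
  · apply Prod.Lex.right; simp
end

def permutations_dist_helper (word : String) (dist : Int) (all_options : List String) (mila : String) : List String :=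
  pdhA word.toList dist all_options mila.toList

-- ===== PORT B =====
-- `not m or m[-1] == w[i] or abs(ord(m[-1]) - ord(w[i])) <= dist` (not m ported as getLast? = none)
def okB (m : List Char) (c : Char) (dist : Int) : Bool :=
  match m.getLast? with
  | none => true
  | some b => b == c || decide (|(b.toNat : Int) - (c.toNat : Int)| ≤ dist)

-- the inner `for i in range(len(w)) if ok` of the comprehension, over the split w = pre ++ rest
def expandB (mst : List Char) (dist : Int) (pre rest : List Char) : List (List Char × List Char) :=
  match rest with
  | [] => []
  | c :: rest' =>
    (if okB mst c dist then [(mst ++ [c], pre ++ rest')] else [])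
      ++ expandB mst dist (pre ++ [c]) rest'

-- one level of the comprehension: expand every state
def stepB (dist : Int) (states : List (List Char × List Char)) : List (List Char × List Char) :=
  states.flatMap (fun s => expandB s.1 dist [] s.2)

-- `for _ in range(n): states = step(states)`
def levelsB (n : Nat) (dist : Int) (states : List (List Char × List Char)) : List (List Char × List Char) :=
  match n with
  | 0 => states
  | k + 1 => levelsB k dist (stepB dist states)

def permutations_dist_helper_alt (word : String) (dist : Int) (all_options : List String) (mila : String) : List String :=
  let w := word.toList
  let m := mila.toList
  if w = [] then all_options ++ [mila]
  else
    let final := levelsB w.length dist [(m, w)]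
    all_options ++ final.map (fun s => String.mk s.1)

-- ===== PRECONDITION & SPEC =====
-- Pre_ excludes word = "" only: there the Python A (and B) append mila to all_options and
-- return None, which is not a value of the declared list type.
def Pre_permutations_dist_helper (word : String) (dist : Int) (all_options : List String) (mila : String) : Prop :=
  word ≠ ""
instance (word : String) (dist : Int) (all_options : List String) (mila : String) : Decidable (Pre_permutations_dist_helper word dist all_options mila) := by unfold Pre_permutations_dist_helper; infer_instance

def pvWitness_permutations_dist_helper : String × Int × List String × String := ("ab", 3, [], "c")

def Spec_permutations_dist_helper (word : String) (dist : Int) (all_options : List String) (mila : String) (out : List String) : Prop := out = permutations_dist_helper_alt word dist all_options mila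
instance (word : String) (dist : Int) (all_options : List String) (mila : String) (out : List String) : Decidable (Spec_permutations_dist_helper word dist all_options mila out) := by unfold Spec_permutations_dist_helper; infer_instance

-- ===== CLAIM (what is proved, stated in full; the proofs are below) =====
def Claim_equal_permutations_dist_helper : Prop := ∀ (word : String) (dist : Int) (all_options : List String) (mila : String), Dom_permutations_dist_helper word dist all_options mila → Pre_permutations_dist_helper word dist all_options mila → Spec_permutations_dist_helper word dist all_options mila (permutations_dist_helper word dist all_options mila)

-- ===== LEMMAS AND PROOFS =====

-- the pair test of both programs, on two chars
def okPairB (a b : Char) (dist : Int) : Bool :=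
  a == b || decide (|(a.toNat : Int) - (b.toNat : Int)| ≤ dist)

-- the some-branch of ok_to_place, as a standalone function
def okLast (c item : Char) (dist : Int) : Bool :=
  let num : Int := (item.toNat : Int) - (c.toNat : Int)
  if num == 0 then true
  else if num > 0 then (if num ≤ dist then true else false)
  else (if (-1) * num ≤ dist then true else false)

theorem ok_to_place_none (m : List Char) (item : Char) (dist : Int)
    (h : m.getLast? = none) : ok_to_place m item dist = true := by
  unfold ok_to_place; rw [h]

theorem ok_to_place_some (m : List Char) (c item : Char) (dist : Int)
    (h : m.getLast? = some c) : ok_to_place m item dist = okLast c item dist := by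
  unfold ok_to_place; rw [h]; rfl

theorem okLast_eq (c item : Char) (dist : Int) : okLast c item dist = okPairB c item dist := by
  by_cases he : item = c
  · subst he; simp [okLast, okPairB]
  · have hne : (item.toNat : Int) ≠ (c.toNat : Int) := by
      intro hn
      exact he (Char.ext (UInt32.toNat_inj.mp (by exact_mod_cast hn)))
    have hcb : (c == item) = false := beq_eq_false_iff_ne.mpr (fun hh => he hh.symm)
    rw [Bool.eq_iff_iff]
    unfold okLast okPairB
    simp only [hcb, Bool.false_or, beq_iff_eq, decide_eq_true_eq, abs_le, gt_iff_lt]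
    split_ifs with h1 h2 h3 h4
    all_goals first
      | exact iff_of_true rfl (by omega)
      | exact iff_of_false (fun f => f) (by omega)

-- B's inline test agrees with A's ok_to_place
theorem okB_eq (m : List Char) (c : Char) (dist : Int) : okB m c dist = ok_to_place m c dist := by
  cases h : m.getLast? with
  | none => rw [ok_to_place_none m c dist h]; simp [okB, h]
  | some b =>
    rw [ok_to_place_some m b c dist h, okLast_eq]
    simp [okB, h, okPairB]

-- A's accumulator is a pure prefix of its result
theorem accLoopA (n : Nat)
    (IH : ∀ k, k < n → ∀ (w : List Char), w.length = k → ∀ (dist : Int) (acc : List String) (m : List Char),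
      pdhA w dist acc m = acc ++ pdhA w dist [] m)
    (w : List Char) (hw : w.length = n) :
    ∀ (rest pre : List Char) (h : pre ++ rest = w) (dist : Int) (m : List Char) (acc : List String),
    pdhALoop w dist m pre rest acc h = acc ++ pdhALoop w dist m pre rest [] h := by
  intro rest
  induction rest with
  | nil =>
    intro pre h dist m acc
    rw [pdhALoop, pdhALoop]
    simp
  | cons item rest' ihr =>
    intro pre h dist m acc
    rw [pdhALoop, pdhALoop]
    rw [ihr (pre ++ [item]) (by rw [← h]; simp) dist m
      (if ok_to_place m item dist then pdhA (pre ++ rest') dist acc (m ++ [item]) else acc)]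
    rw [ihr (pre ++ [item]) (by rw [← h]; simp) dist m
      (if ok_to_place m item dist then pdhA (pre ++ rest') dist [] (m ++ [item]) else [])]
    rw [← List.append_assoc]
    congr 1
    have hlen : (pre ++ rest').length < n := by
      have hl := congrArg List.length h
      simp only [List.length_append, List.length_cons] at hl
      simp only [List.length_append]
      omega
    by_cases hok : ok_to_place m item dist = true
    · rw [if_pos hok, if_pos hok]
      exact IH _ hlen _ rfl dist acc (m ++ [item])
    · rw [if_neg hok, if_neg hok]
      simp

theorem accA (n : Nat) : ∀ (w : List Char), w.length = n →
    ∀ (dist : Int) (acc : List String) (m : List Char),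
    pdhA w dist acc m = acc ++ pdhA w dist [] m := by
  induction n using Nat.strong_induction_on with
  | _ n IH =>
    intro w hw dist acc m
    by_cases hwe : w = []
    · subst hwe
      rw [pdhA, pdhA]
      simp
    · rw [pdhA, pdhA, if_neg hwe, if_neg hwe]
      exact accLoopA n IH w hw w [] rfl dist m acc

theorem accA' (w : List Char) (dist : Int) (acc : List String) (m : List Char) :
    pdhA w dist acc m = acc ++ pdhA w dist [] m :=
  accA w.length w rfl dist acc m

-- A's inner loop produces exactly the DFS results of B's expansion of the state (m, word)
theorem loopExpand (w : List Char) :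
    ∀ (rest pre : List Char) (h : pre ++ rest = w) (dist : Int) (m : List Char) (acc : List String),
    pdhALoop w dist m pre rest acc h
      = acc ++ (expandB m dist pre rest).flatMap (fun t => pdhA t.2 dist [] t.1) := by
  intro rest
  induction rest with
  | nil =>
    intro pre h dist m acc
    rw [pdhALoop]
    simp [expandB]
  | cons item rest' ihr =>
    intro pre h dist m acc
    rw [pdhALoop]
    rw [ihr (pre ++ [item]) (by rw [← h]; simp) dist m
      (if ok_to_place m item dist then pdhA (pre ++ rest') dist acc (m ++ [item]) else acc)]
    rw [expandB]
    rw [List.flatMap_append, ← List.append_assoc]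
    congr 1
    rw [okB_eq]
    by_cases hok : ok_to_place m item dist = true
    · rw [if_pos hok, if_pos hok]
      rw [accA' (pre ++ rest') dist acc (m ++ [item])]
      simp
    · rw [if_neg hok, if_neg hok]
      simp

-- every state expandB produces has one letter less to place
theorem expandB_len (mst : List Char) (dist : Int) :
    ∀ (rest pre : List Char) (t : List Char × List Char), t ∈ expandB mst dist pre rest →
      t.2.length + 1 = pre.length + rest.length := by
  intro rest
  induction rest with
  | nil => intro pre t ht; simp [expandB] at ht
  | cons c rest' ihr =>
    intro pre t ht
    rw [expandB] at ht
    rcases List.mem_append.mp ht with h1 | h2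
    · split_ifs at h1 with hc
      · simp at h1
        subst h1
        show (pre ++ rest').length + 1 = pre.length + (c :: rest').length
        simp only [List.length_append, List.length_cons]
        omega
      · simp at h1
    · have := ihr (pre ++ [c]) t h2
      simp only [List.length_append, List.length_cons, List.length_nil] at this ⊢
      omega

-- after L levels, the surviving states (each with L letters left) yield the DFS outputs in order
theorem levelsEq (dist : Int) :
    ∀ (L : Nat) (S : List (List Char × List Char)), (∀ s ∈ S, s.2.length = L) →
    (levelsB L dist S).map (fun s => String.mk s.1)
      = S.flatMap (fun s => pdhA s.2 dist [] s.1) := by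
  intro L
  induction L with
  | zero =>
    intro S hS
    rw [levelsB]
    induction S with
    | nil => simp
    | cons s S' ihS =>
      have hs2 : s.2 = [] := List.length_eq_zero_iff.mp (hS s (by simp))
      rw [List.map_cons, List.flatMap_cons]
      rw [ihS (fun t ht => hS t (by simp [ht]))]
      rw [hs2, pdhA]
      simp
  | succ L ihL =>
    intro S hS
    rw [levelsB]
    rw [ihL (stepB dist S) ?hlen]
    case hlen =>
      intro t ht
      rcases List.mem_flatMap.mp ht with ⟨s, hsS, hts⟩
      have := expandB_len s.1 dist s.2 [] t hts
      have := hS s hsS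
      simp at *
      omega
    unfold stepB
    rw [List.flatMap_assoc]
    induction S with
    | nil => simp
    | cons s S' ihS =>
      rw [List.flatMap_cons, List.flatMap_cons]
      rw [ihS (fun t ht => hS t (by simp [ht]))]
      congr 1
      have hne : s.2 ≠ [] := by
        intro hh
        have := hS s (by simp)
        rw [hh] at this
        simp at this
      rw [pdhA, if_neg hne]
      rw [loopExpand s.2 s.2 [] rfl dist s.1 []]
      simp

-- ===== VERDICT (by name: the statement is the Claim_ definition above) =====
theorem permutations_dist_helper_spec : Claim_equal_permutations_dist_helper := by
  intro word dist all_options mila _ hpre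
  show permutations_dist_helper word dist all_options mila
      = permutations_dist_helper_alt word dist all_options mila
  unfold permutations_dist_helper permutations_dist_helper_alt
  have hw : word.toList ≠ [] := fun hh => hpre (String.toList_eq_nil_iff.mp hh)
  rw [if_neg hw]
  show pdhA word.toList dist all_options mila.toList
      = all_options ++ (levelsB word.toList.length dist [(mila.toList, word.toList)]).map
          (fun s => String.mk s.1)
  rw [levelsEq dist word.toList.length [(mila.toList, word.toList)] (by simp)]
  rw [List.flatMap_cons, List.flatMap_nil]
  rw [accA' word.toList dist all_options mila.toList]
  simp
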